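-- pv_equiv track=rewrite | github.com/PacificBiosciences/FALCON | falcon_kit/mains/consensus.py | get_longest_reads
-- ===== SOURCE A (Python) =====
-- def get_longest_reads(seqs, max_n_read, max_cov_aln, sort=True):
--     # including the sort kwarg allows us to avoid a redundant sort
--     # in get_consensus_trimmed()
--     if sort:
--         seqs = seqs[:1] + sorted(seqs[1:], key=lambda x: -len(x))
--
--     longest_n_reads = max_n_read
--     if max_cov_aln > 0:
--         longest_n_reads = 1
--         seed_len = len(seqs[0])
--         read_cov = 0
--         for seq in seqs[1:]:
--             if read_cov // seed_len > max_cov_aln: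
--                 break
--             longest_n_reads += 1
--             read_cov += len(seq)
--
--         longest_n_reads = min(longest_n_reads, max_n_read)
--
--     return(seqs[:longest_n_reads])
-- ===== SOURCE B (Python) =====
-- def get_longest_reads(seqs, max_n_read, max_cov_aln, sort=True):
--     head = seqs[:1]
--     tail = sorted(seqs[1:], key=lambda x: -len(x)) if sort else seqs[1:]
--     seqs = head + tail
--     if max_cov_aln <= 0:
--         return seqs[:max_n_read]
--     seed_len = len(seqs[0])  # IndexError on empty seqs, as in the original
--     # cov // seed_len > max_cov_aln  <=>  cov >= (max_cov_aln + 1) * seed_len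
--     threshold = (max_cov_aln + 1) * seed_len
--     # coverage accumulated BEFORE taking tail[i]
--     prefs = []
--     c = 0
--     for s in tail:
--         prefs.append(c)
--         c += len(s)
--     # prefs is nondecreasing (lengths are >= 0), so BINARY-SEARCH the first
--     # index whose prior coverage reaches the threshold
--     lo, hi = 0, len(tail)
--     while lo < hi:
--         mid = (lo + hi) // 2
--         if prefs[mid] >= threshold:
--             hi = mid
--         else:
--             lo = mid + 1
--     return seqs[:min(1 + lo, max_n_read)]
-- ===== Notes on version B (the rewrite author's own statement) =====
-- stated objective: alternative
-- what changed: B replaces A's stateful break-loop dividing the running coverage at each read by a multiplicative threshold plus a binary search over the nondecreasing prefix-coverage table for the first index reaching it (valid because lengths are nonnegative, so the table is monotone).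
import Mathlib
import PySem

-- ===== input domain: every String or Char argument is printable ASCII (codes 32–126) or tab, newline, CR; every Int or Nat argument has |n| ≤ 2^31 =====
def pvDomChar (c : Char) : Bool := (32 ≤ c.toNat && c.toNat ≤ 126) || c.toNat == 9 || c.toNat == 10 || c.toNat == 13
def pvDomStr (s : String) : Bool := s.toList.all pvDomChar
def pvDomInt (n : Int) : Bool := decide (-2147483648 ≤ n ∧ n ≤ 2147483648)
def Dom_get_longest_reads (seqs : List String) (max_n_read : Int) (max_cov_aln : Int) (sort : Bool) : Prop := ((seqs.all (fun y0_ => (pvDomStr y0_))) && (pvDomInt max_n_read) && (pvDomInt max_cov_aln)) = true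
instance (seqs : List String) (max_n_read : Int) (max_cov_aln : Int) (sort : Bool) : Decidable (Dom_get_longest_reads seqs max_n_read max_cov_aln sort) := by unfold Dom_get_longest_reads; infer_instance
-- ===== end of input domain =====

-- B replaces A's stateful break-loop (which floor-divides the running coverage at every
-- read) by a multiplicative threshold plus a binary search over the nondecreasing
-- prefix-coverage table; same asymptotic cost (objective: alternative).

-- ===== PORT A =====
-- A's for-loop with break, state = (longest_n_reads, read_cov)
def pvLoopA (seed_len max_cov_aln : Int) : List String → Int → Int → Int
  | [], n, _ => n
  | s :: rest, n, cov =>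
    if PySem.Int.floordiv cov seed_len > max_cov_aln then n
    else pvLoopA seed_len max_cov_aln rest (n + 1) (cov + PySem.Str.len s)

def get_longest_reads (seqs : List String) (max_n_read : Int) (max_cov_aln : Int) (sort : Bool) : List String :=
  let seqs := if sort then
      PySem.List.slice seqs none (some 1) ++
        PySem.List.sorted (PySem.List.slice seqs (some 1) none) (fun x => -PySem.Str.len x)
    else seqs
  let longest_n_reads := max_n_read
  let longest_n_reads :=
    if max_cov_aln > 0 then
      -- len(seqs[0]); IndexError on empty seqs in Python (excluded by Pre_), headD "" here
      let seed_len := PySem.Str.len (seqs.headD "")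
      let n := pvLoopA seed_len max_cov_aln (PySem.List.slice seqs (some 1) none) 1 0
      min n max_n_read
    else longest_n_reads
  PySem.List.slice seqs none (some longest_n_reads)

-- ===== PORT B =====
-- B's prefix loop: prefs.append(c); c += len(s)   (coverage BEFORE each read)
def pvPrefs : List String → Int → List Int
  | [], _ => []
  | s :: rest, c => c :: pvPrefs rest (c + PySem.Str.len s)

-- B's while-loop binary search; prefs[mid] is always in range (lo < hi ≤ len prefs),
-- ported with getD; the fuel argument (hi - lo at the call site suffices, since
-- hi - lo strictly decreases) only makes the while loop structurally total
def pvBSearch (fuel : Nat) (prefs : List Int) (t : Int) (lo hi : Nat) : Nat :=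
  match fuel with
  | 0 => lo
  | fuel + 1 =>
    if lo < hi then
      let mid := (lo + hi) / 2
      if t ≤ prefs.getD mid 0 then pvBSearch fuel prefs t lo mid
      else pvBSearch fuel prefs t (mid + 1) hi
    else lo

def get_longest_reads_alt (seqs : List String) (max_n_read : Int) (max_cov_aln : Int) (sort : Bool) : List String :=
  let head := PySem.List.slice seqs none (some 1)
  let tail := if sort then
      PySem.List.sorted (PySem.List.slice seqs (some 1) none) (fun x => -PySem.Str.len x)
    else PySem.List.slice seqs (some 1) none
  let seqs := head ++ tail
  if max_cov_aln ≤ 0 then PySem.List.slice seqs none (some max_n_read)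
  else
    let seed_len := PySem.Str.len (seqs.headD "")  -- len(seqs[0]); IndexError on empty (excluded by Pre_)
    let threshold := (max_cov_aln + 1) * seed_len
    let prefs := pvPrefs tail 0
    let lo := pvBSearch tail.length prefs threshold 0 tail.length
    PySem.List.slice seqs none (some (min (1 + (lo : Int)) max_n_read))

-- ===== PRECONDITION & SPEC =====
-- Pre_ excludes exactly the inputs where Python A raises: with max_cov_aln > 0, an empty
-- seqs (IndexError on seqs[0]) or a zero-length seed read with a non-empty tail
-- (ZeroDivisionError on read_cov // seed_len).
def Pre_get_longest_reads (seqs : List String) (max_n_read : Int) (max_cov_aln : Int) (sort : Bool) : Prop :=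
  max_cov_aln > 0 → seqs ≠ [] ∧ (2 ≤ seqs.length → PySem.Str.len (seqs.headD "") ≠ 0)
instance (seqs : List String) (max_n_read : Int) (max_cov_aln : Int) (sort : Bool) : Decidable (Pre_get_longest_reads seqs max_n_read max_cov_aln sort) := by unfold Pre_get_longest_reads; infer_instance

def pvWitness_get_longest_reads : List String × Int × Int × Bool := (["ab", "c", "def"], 5, 1, true)

def Spec_get_longest_reads (seqs : List String) (max_n_read : Int) (max_cov_aln : Int) (sort : Bool) (out : List String) : Prop := out = get_longest_reads_alt seqs max_n_read max_cov_aln sort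
instance (seqs : List String) (max_n_read : Int) (max_cov_aln : Int) (sort : Bool) (out : List String) : Decidable (Spec_get_longest_reads seqs max_n_read max_cov_aln sort out) := by unfold Spec_get_longest_reads; infer_instance

-- ===== CLAIM (what is proved, stated in full; the proofs are below) =====
def Claim_equal_get_longest_reads : Prop := ∀ (seqs : List String) (max_n_read : Int) (max_cov_aln : Int) (sort : Bool), Dom_get_longest_reads seqs max_n_read max_cov_aln sort → Pre_get_longest_reads seqs max_n_read max_cov_aln sort → Spec_get_longest_reads seqs max_n_read max_cov_aln sort (get_longest_reads seqs max_n_read max_cov_aln sort)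

-- ===== LEMMAS AND PROOFS =====

-- A's break-loop counts the first index of the prefix-coverage table whose entry
-- already exceeds the cap (generalized over running count n and coverage cov).
theorem loopA_eq (seed mc : Int) : ∀ (tail : List String) (n cov : Int),
    pvLoopA seed mc tail n cov =
      n + ((pvPrefs tail cov).findIdx (fun c => decide (PySem.Int.floordiv c seed > mc)) : Int) := by
  intro tail
  induction tail with
  | nil => intro n cov; simp [pvLoopA, pvPrefs]
  | cons s rest ih =>
    intro n cov
    simp only [pvLoopA, pvPrefs, List.findIdx_cons]
    by_cases h : PySem.Int.floordiv cov seed > mc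
    · simp [h]
    · simp only [h, decide_false, cond_false]
      rw [ih (n + 1) (cov + PySem.Str.len s)]
      push_cast
      ring

-- the prefix-coverage table is bounded below by its seed coverage …
theorem prefs_lb : ∀ (tail : List String) (c : Int) (j : Nat), j < tail.length →
    c ≤ (pvPrefs tail c).getD j 0 := by
  intro tail
  induction tail with
  | nil => intro c j h; simp at h
  | cons s rest ih =>
    intro c j h
    cases j with
    | zero => simp [pvPrefs]
    | succ k =>
      have := ih (c + PySem.Str.len s) k (by simpa using h)
      have hl : 0 ≤ PySem.Str.len s := by simp [PySem.Str.len_eq]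
      simpa [pvPrefs] using le_trans (by omega) this

-- … hence nondecreasing
theorem prefs_mono : ∀ (tail : List String) (c : Int) (i j : Nat), i ≤ j → j < tail.length →
    (pvPrefs tail c).getD i 0 ≤ (pvPrefs tail c).getD j 0 := by
  intro tail
  induction tail with
  | nil => intro c i j _ h; simp at h
  | cons s rest ih =>
    intro c i j hij hj
    cases i with
    | zero =>
      cases j with
      | zero => simp
      | succ k =>
        have := prefs_lb rest (c + PySem.Str.len s) k (by simpa using hj)
        have hl : 0 ≤ PySem.Str.len s := by simp [PySem.Str.len_eq]
        simpa [pvPrefs] using le_trans (by omega) this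
    | succ i' =>
      cases j with
      | zero => omega
      | succ k => simpa [pvPrefs] using ih (c + PySem.Str.len s) i' k (by omega) (by simpa using hj)

-- findIdx returns k when everything before k fails and k (if in range) succeeds
theorem findIdx_char (p : Int → Bool) : ∀ (l : List Int) (k : Nat), k ≤ l.length →
    (∀ i, i < k → ¬ p (l.getD i 0)) → (k < l.length → p (l.getD k 0)) →
    l.findIdx p = k := by
  intro l
  induction l with
  | nil => intro k hk _ _; simp at hk ⊢; omega
  | cons x xs ih =>
    intro k hk hlt hge
    cases k with
    | zero =>
      have hx : p x = true := by simpa using hge (by simp)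
      simp [List.findIdx_cons, hx]
    | succ k' =>
      have hx : ¬ p x := by simpa using hlt 0 (by omega)
      simp only [List.findIdx_cons, Bool.cond_eq_ite, if_neg hx]
      have := ih k' (by simpa using hk)
        (fun i hi => by simpa using hlt (i + 1) (by omega))
        (fun h => by simpa using hge (by simpa using h))
      omega

-- binary search over a nondecreasing table computes findIdx, given the loop invariant
theorem bsearch_eq (prefs : List Int) (t : Int)
    (hmono : ∀ i j, i ≤ j → j < prefs.length → prefs.getD i 0 ≤ prefs.getD j 0) :
    ∀ (fuel lo hi : Nat), hi - lo ≤ fuel → lo ≤ hi → hi ≤ prefs.length →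
    (∀ i, i < lo → ¬ t ≤ prefs.getD i 0) →
    (∀ i, hi ≤ i → i < prefs.length → t ≤ prefs.getD i 0) →
    pvBSearch fuel prefs t lo hi = prefs.findIdx (fun c => decide (t ≤ c)) := by
  intro fuel
  induction fuel with
  | zero =>
    intro lo hi hfuel hlohi hhile hbefore hafter
    have hlh : lo = hi := by omega
    subst hlh
    exact (findIdx_char _ prefs lo hhile
      (fun i hi => by simpa using hbefore i hi)
      (fun hlt => by simpa using hafter lo (le_refl _) hlt)).symm
  | succ fuel ih =>
    intro lo hi hfuel hlohi hhile hbefore hafter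
    rw [pvBSearch]
    by_cases h : lo < hi
    · simp only [h, if_true]
      by_cases hmid : t ≤ prefs.getD ((lo + hi) / 2) 0
      · simp only [hmid, if_true]
        exact ih lo ((lo + hi) / 2) (by omega) (by omega) (by omega)
          hbefore
          (fun i hi1 hi2 => le_trans hmid (hmono _ i hi1 hi2))
      · simp only [hmid, if_false]
        exact ih ((lo + hi) / 2 + 1) hi (by omega) (by omega) hhile
          (fun i hi1 => by
            intro hc
            exact hmid (le_trans hc (hmono i ((lo + hi) / 2) (by omega) (by omega))))
          hafter
    · simp only [h, if_false]
      have hlh : lo = hi := by omega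
      subst hlh
      exact (findIdx_char _ prefs lo hhile
        (fun i hi => by simpa using hbefore i hi)
        (fun hlt => by simpa using hafter lo (le_refl _) hlt)).symm

-- predicates agreeing on the list give the same findIdx
theorem findIdx_ext (p q : Int → Bool) : ∀ (l : List Int), (∀ x ∈ l, p x = q x) →
    l.findIdx p = l.findIdx q := by
  intro l
  induction l with
  | nil => intro _; rfl
  | cons x xs ih =>
    intro hpq
    simp only [List.findIdx_cons, hpq x (by simp)]
    rw [ih (fun y hy => hpq y (by simp [hy]))]

-- with a positive seed, A's division test is B's threshold test
theorem cond_iff (seed mc c : Int) (hseed : 0 < seed) :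
    (PySem.Int.floordiv c seed > mc) ↔ ((mc + 1) * seed ≤ c) := by
  constructor
  · intro h
    exact (PySem.Int.le_floordiv_iff_mul_le hseed).1 (by omega)
  · intro h
    have := (PySem.Int.le_floordiv_iff_mul_le hseed).2 h
    omega

theorem pvPrefs_length : ∀ (tail : List String) (c : Int), (pvPrefs tail c).length = tail.length := by
  intro tail
  induction tail with
  | nil => intro c; rfl
  | cons s rest ih => intro c; simp [pvPrefs, ih]

theorem ports_eq (seqs : List String) (max_n_read max_cov_aln : Int) (sort : Bool)
    (hpre : Pre_get_longest_reads seqs max_n_read max_cov_aln sort) :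
    get_longest_reads seqs max_n_read max_cov_aln sort
      = get_longest_reads_alt seqs max_n_read max_cov_aln sort := by
  have hto : ∀ (xs : List String), PySem.List.slice xs none (some 1) = xs.take 1 :=
    fun xs => PySem.List.slice_to xs (by norm_num)
  have hfrom : ∀ (xs : List String), PySem.List.slice xs (some 1) = xs.drop 1 :=
    fun xs => PySem.List.slice_from xs (by norm_num)
  cases seqs with
  | nil =>
    by_cases hmc : max_cov_aln ≤ 0
    · cases sort <;>
        simp [get_longest_reads, get_longest_reads_alt,
          PySem.List.slice, hmc, show ¬ max_cov_aln > 0 from by omega]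
    · exact absurd (hpre (by omega)).1 (by simp)
  | cons h t =>
    simp only [get_longest_reads, get_longest_reads_alt, hto, hfrom,
      List.take_succ_cons, List.take_zero, List.drop_one, List.tail_cons]
    have hA : (if sort = true then [h] ++ PySem.List.sorted t (fun x => -PySem.Str.len x) else h :: t)
        = h :: (if sort = true then PySem.List.sorted t (fun x => -PySem.Str.len x) else t) := by
      cases sort <;> simp
    rw [hA]
    set tail := if sort = true then PySem.List.sorted t (fun x => -PySem.Str.len x) else t with htail
    simp only [List.headD_cons, List.cons_append, List.nil_append]
    by_cases hmc : max_cov_aln ≤ 0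
    · simp [hmc, show ¬ max_cov_aln > 0 from by omega]
    · simp only [hmc, if_false, show max_cov_aln > 0 from by omega, if_true]
      congr 2
      simp only [List.tail_cons]
      rw [loopA_eq]
      rw [bsearch_eq (pvPrefs tail 0) ((max_cov_aln + 1) * PySem.Str.len h)
        (fun i j hij hj => prefs_mono tail 0 i j hij (by rwa [pvPrefs_length] at hj))
        tail.length 0 tail.length (by omega) (by omega) (le_of_eq (pvPrefs_length tail 0).symm)
        (fun i hi1 => absurd hi1 (Nat.not_lt_zero i))
        (fun i hi1 hi2 => absurd hi2 (by rw [pvPrefs_length]; omega))]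
      cases htl : tail with
      | nil => simp [pvPrefs]
      | cons s rest =>
        -- tail nonempty: seqs has ≥ 2 elements, so Pre_ gives a nonzero (positive) seed
        have ht1 : 1 ≤ t.length := by
          have hlen := congrArg List.length htl
          rw [htail] at hlen
          cases hs : sort with
          | false => rw [hs] at hlen; simp at hlen; omega
          | true =>
            rw [hs] at hlen
            rw [if_pos rfl, PySem.List.length_sorted] at hlen
            simp at hlen
            omega
        have hseed : 0 < PySem.Str.len h := by
          have := (hpre (by omega)).2 (by simp; omega)
          have hnn : 0 ≤ PySem.Str.len h := by simp [PySem.Str.len_eq]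
          simp only [List.headD_cons] at this
          omega
        rw [← htl]
        have hfx := findIdx_ext
          (fun c => decide (PySem.Int.floordiv c (PySem.Str.len h) > max_cov_aln))
          (fun c => decide ((max_cov_aln + 1) * PySem.Str.len h ≤ c))
          (pvPrefs tail 0) (fun x _ => by
            simp only [decide_eq_decide]
            exact cond_iff (PySem.Str.len h) max_cov_aln x hseed)
        rw [hfx]

-- ===== VERDICT (by name: the statement is the Claim_ definition above) =====
theorem get_longest_reads_spec : Claim_equal_get_longest_reads := by
  intro seqs mnr mca sort _ hpre
  unfold Spec_get_longest_reads
  exact ports_eq seqs mnr mca sort hpre
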